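-- pv_equiv track=rewrite | github.com/JuanNovas/Truco-B0T | TrucoV1.0.py | calcular_tanto
-- ===== SOURCE A (Python) =====
-- def calcular_tanto(cartas):
--     valor_max = 0
--     tantos = []
--     tantos.append(cartas[0] + cartas[1])
--     tantos.append(cartas[0] + cartas[2])
--     tantos.append(cartas[1] + cartas[2])
--
--     for tanto in tantos:
--         if tanto > valor_max:
--             valor_max = tanto
--
--     return valor_max
-- ===== SOURCE B (Python) =====
-- def calcular_tanto(cartas):
--     a, b, c = cartas[0], cartas[1], cartas[2]
--     return max(0, a + b + c - min(a, b, c))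
-- ===== Notes on version B (the rewrite author's own statement) =====
-- stated objective: simpler
-- what changed: Replaces building the three pairwise sums and scanning for the max with the closed form total-minus-minimum, max(0, a+b+c-min(a,b,c)), keeping the zero floor from valor_max's initialisation.
import Mathlib
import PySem

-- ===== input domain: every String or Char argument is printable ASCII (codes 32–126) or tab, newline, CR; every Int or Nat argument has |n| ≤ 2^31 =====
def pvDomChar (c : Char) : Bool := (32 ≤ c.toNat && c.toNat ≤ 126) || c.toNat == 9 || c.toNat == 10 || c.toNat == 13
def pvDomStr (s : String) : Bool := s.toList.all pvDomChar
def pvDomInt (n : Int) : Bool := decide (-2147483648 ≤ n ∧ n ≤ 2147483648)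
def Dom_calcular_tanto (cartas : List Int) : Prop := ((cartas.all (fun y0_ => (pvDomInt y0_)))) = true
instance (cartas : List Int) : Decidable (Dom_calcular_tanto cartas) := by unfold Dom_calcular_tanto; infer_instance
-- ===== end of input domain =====

-- B computes the same value by a closed form: max(0, a+b+c-min(a,b,c)) instead of listing the pairwise sums and scanning.

-- ===== PORT A =====
def calcular_tanto (cartas : List Int) : Int :=
  -- cartas[0], cartas[1], cartas[2]; Pre_ guarantees the indices are in range (Python raises IndexError otherwise)
  let c0 := (PySem.List.pyGet? cartas 0).getD 0
  let c1 := (PySem.List.pyGet? cartas 1).getD 0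
  let c2 := (PySem.List.pyGet? cartas 2).getD 0
  let tantos : List Int := [c0 + c1, c0 + c2, c1 + c2]
  tantos.foldl (fun valor_max tanto => if tanto > valor_max then tanto else valor_max) 0

-- ===== PORT B =====
def calcular_tanto_alt (cartas : List Int) : Int :=
  let a := (PySem.List.pyGet? cartas 0).getD 0
  let b := (PySem.List.pyGet? cartas 1).getD 0
  let c := (PySem.List.pyGet? cartas 2).getD 0
  max 0 (a + b + c - min a (min b c))

-- ===== PRECONDITION & SPEC =====
-- Pre_: A indexes cartas[0..2], so it raises IndexError on lists with fewer than three elements.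
def Pre_calcular_tanto (cartas : List Int) : Prop := 3 ≤ cartas.length
instance (cartas : List Int) : Decidable (Pre_calcular_tanto cartas) := by unfold Pre_calcular_tanto; infer_instance
def pvWitness_calcular_tanto : List Int := [1, 7, 3]

def Spec_calcular_tanto (cartas : List Int) (out : Int) : Prop := out = calcular_tanto_alt cartas
instance (cartas : List Int) (out : Int) : Decidable (Spec_calcular_tanto cartas out) := by unfold Spec_calcular_tanto; infer_instance

-- ===== CLAIM (what is proved, stated in full; the proofs are below) =====
def Claim_equal_calcular_tanto : Prop := ∀ (cartas : List Int), Dom_calcular_tanto cartas → Pre_calcular_tanto cartas → Spec_calcular_tanto cartas (calcular_tanto cartas)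

-- ===== LEMMAS AND PROOFS =====

-- ===== VERDICT (by name: the statement is the Claim_ definition above) =====
theorem calcular_tanto_spec : Claim_equal_calcular_tanto := by
  intro cartas _ _
  unfold Spec_calcular_tanto calcular_tanto calcular_tanto_alt
  simp only [List.foldl]
  split_ifs <;> omega
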